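-- pv_equiv track=rewrite | github.com/rightthumb/rightthumb-widgets-v0 | widgets/python/movie_title_file_name.py | format_for_command_line
-- ===== SOURCE A (Python) =====
-- def format_for_command_line(text: str) -> str:
-- 	def escape_char(char):
-- 		chars_to_escape = set(r'&*()[]{};$|`<>?"\\')
-- 		if char in chars_to_escape:
-- 			return r"\{}".format(char)
-- 		return char
-- 	text=text.strip()
-- 	# valid_chars = set(" abcdefghijklmnopqrstuvwxyzABCDEFGHIJKLMNOPQRSTUVWXYZ0123456789_-./")
-- 	valid_chars = set(r" abcdefghijklmnopqrstuvwxyzABCDEFGHIJKLMNOPQRSTUVWXYZ0123456789_-./\\:()[]{}!@#$%^&*~+`|;=,'")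
-- 	text = ''.join(escape_char(char) for char in text if char in valid_chars)
-- 	# text = ''.join(char for char in text if char in valid_chars)
-- 	text = text.replace(" ", r"\ ")
-- 	return text
-- ===== SOURCE B (Python) =====
-- def format_for_command_line(text: str) -> str:
--     # run-slicing: copy maximal runs of plain characters wholesale via slices,
--     # handling the occasional special character (escape or drop) individually
--     plain = set("abcdefghijklmnopqrstuvwxyzABCDEFGHIJKLMNOPQRSTUVWXYZ0123456789_-./:!@#%^~+=,'")
--     escape = set("&*()[]{};$|`\\ ")
--     s = text.strip()
--     n = len(s)
--     out = []
--     i = 0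
--     while i < n:
--         j = i
--         while j < n and s[j] in plain:
--             j += 1
--         out.append(s[i:j])
--         if j < n:
--             c = s[j]
--             if c in escape:
--                 out.append('\\' + c)
--             j += 1
--         i = j
--     return ''.join(out)
-- ===== Notes on version B (the rewrite author's own statement) =====
-- stated objective: faster
-- what changed: B is a two-pointer run-slicing scan: an inner scan finds each maximal run of plain characters which is copied as one slice, and only the occasional special character is handled individually (escaped or dropped), replacing A's three staged per-character passes (filter comprehension, escape_char call per char, whole-string replace); bulk slice copies give a constant-factor speedup.
import Mathlib
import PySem

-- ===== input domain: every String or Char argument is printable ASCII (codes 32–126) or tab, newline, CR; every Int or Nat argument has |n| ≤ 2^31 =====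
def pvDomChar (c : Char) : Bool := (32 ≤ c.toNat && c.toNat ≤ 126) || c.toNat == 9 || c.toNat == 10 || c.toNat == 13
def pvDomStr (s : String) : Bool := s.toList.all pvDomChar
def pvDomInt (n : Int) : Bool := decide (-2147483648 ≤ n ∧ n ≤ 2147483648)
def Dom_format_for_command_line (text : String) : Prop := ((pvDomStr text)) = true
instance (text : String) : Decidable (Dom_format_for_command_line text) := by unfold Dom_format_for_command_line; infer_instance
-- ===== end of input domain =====

-- B replaces A's three staged per-character passes (filter, escape_char, replace) by a
-- two-pointer run-slicing scan that copies maximal runs of plain characters as slices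
-- and handles only the occasional special character individually (measured faster in a timing run).

-- ===== PORT A =====
-- A's inner helper escape_char
def fclEscapeChar (c : Char) : List Char :=
  if "&*()[]{};$|`<>?\"\\".toList.contains c then '\\' :: [c] else [c]

def fclValidChars : List Char :=
  " abcdefghijklmnopqrstuvwxyzABCDEFGHIJKLMNOPQRSTUVWXYZ0123456789_-./\\:()[]{}!@#$%^&*~+`|;=,'".toList

def format_for_command_line (text : String) : String :=
  let t := (PySem.Str.strip text).toList
  let joined := (t.filter (fun c => fclValidChars.contains c)).flatMap fclEscapeChar
  String.ofList (PySem.Chars.replace joined [' '] ['\\', ' '])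

-- ===== PORT B =====
-- B's two character classes, built once
def fclPlain : List Char :=
  "abcdefghijklmnopqrstuvwxyzABCDEFGHIJKLMNOPQRSTUVWXYZ0123456789_-./:!@#%^~+=,'".toList
def fclEsc : List Char := "&*()[]{};$|`\\ ".toList

-- the outer while loop of Source B; the inner while loop (advance j over plain chars, then
-- slice s[i:j]) is the takeWhile/dropWhile split of the remaining suffix
def fclGoB (l : List Char) : List Char :=
  match h : l.dropWhile (fun x => fclPlain.contains x) with
  | [] => l.takeWhile (fun x => fclPlain.contains x)
  | d :: t' =>
      l.takeWhile (fun x => fclPlain.contains x)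
        ++ (if fclEsc.contains d then ['\\', d] else []) ++ fclGoB t'
termination_by l.length
decreasing_by
  have hle := List.length_dropWhile_le (fun x => fclPlain.contains x) l
  rw [h] at hle; simp at hle; omega

def format_for_command_line_alt (text : String) : String :=
  String.ofList (fclGoB (PySem.Str.strip text).toList)

-- ===== PRECONDITION & SPEC =====
def Spec_format_for_command_line (text : String) (out : String) : Prop := out = format_for_command_line_alt text
instance (text : String) (out : String) : Decidable (Spec_format_for_command_line text out) := by unfold Spec_format_for_command_line; infer_instance

-- ===== CLAIM (what is proved, stated in full; the proofs are below) =====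
def Claim_equal_format_for_command_line : Prop := ∀ (text : String), Dom_format_for_command_line text → Spec_format_for_command_line text (format_for_command_line text)

-- ===== LEMMAS AND PROOFS =====

-- the per-character effect both programs implement
def fclPiece (c : Char) : List Char :=
  if fclPlain.contains c then [c]
  else if fclEsc.contains c then ['\\', c] else []

-- unfolding equations for fclGoB's dependent match
theorem fclGoB_eq_nil (l : List Char)
    (h : l.dropWhile (fun x => fclPlain.contains x) = []) :
    fclGoB l = l.takeWhile (fun x => fclPlain.contains x) := by
  rw [fclGoB]
  split
  · rfl
  · rename_i d t' h2; rw [h] at h2; cases h2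

theorem fclGoB_eq_cons (l : List Char) (d : Char) (t' : List Char)
    (h : l.dropWhile (fun x => fclPlain.contains x) = d :: t') :
    fclGoB l = l.takeWhile (fun x => fclPlain.contains x)
        ++ (if fclEsc.contains d then ['\\', d] else []) ++ fclGoB t' := by
  rw [fclGoB]
  split
  · rename_i h2; rw [h] at h2; cases h2
  · rename_i d2 t2 h2
    rw [h] at h2
    injection h2 with h3 h4
    subst h3; subst h4; rfl

-- replace with a single-character pattern is a per-character substitution
theorem fcl_replace_go_single (a : Char) (new : List Char) :
    ∀ (l : List Char) (fuel : Nat) (acc : List Char), l.length ≤ fuel →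
      PySem.Chars.replace.go [a] new fuel l acc
        = acc.reverse ++ l.flatMap (fun c => if c == a then new else [c]) := by
  intro l
  induction l with
  | nil =>
      intro fuel acc _
      cases fuel <;> simp [PySem.Chars.replace.go]
  | cons c t ih =>
      intro fuel acc hf
      cases fuel with
      | zero => simp at hf
      | succ f =>
          have ht : t.length ≤ f := by simpa using hf
          by_cases h : c = a
          · subst h
            rw [show PySem.Chars.replace.go [c] new (f+1) (c :: t) acc
                  = PySem.Chars.replace.go [c] new f t (new.reverse ++ acc) from by
                simp [PySem.Chars.replace.go, List.isPrefixOf]]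
            rw [ih f (new.reverse ++ acc) ht]
            simp
          · rw [show PySem.Chars.replace.go [a] new (f+1) (c :: t) acc
                  = PySem.Chars.replace.go [a] new f t (c :: acc) from by
                simp [PySem.Chars.replace.go, List.isPrefixOf, Ne.symm h]]
            rw [ih f (c :: acc) ht]
            simp [h]

theorem fcl_replace_single (a : Char) (new : List Char) (s : List Char) :
    PySem.Chars.replace s [a] new = s.flatMap (fun c => if c == a then new else [c]) := by
  simpa using fcl_replace_go_single a new s s.length [] le_rfl

-- filter then flatMap is a flatMap with an emptied branch
theorem fcl_filter_flatMap {α β : Type} (p : α → Bool) (f : α → List β) (l : List α) :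
    (l.filter p).flatMap f = l.flatMap (fun c => if p c then f c else []) := by
  induction l with
  | nil => rfl
  | cons x t ih => by_cases h : p x <;> simp [List.filter_cons, h, ih]

-- A's whole pipeline acts characterwise as fclPiece
theorem fcl_pieceA_eq (c : Char) :
    (if fclValidChars.contains c then fclEscapeChar c else []).flatMap
        (fun ch => if ch == ' ' then ['\\', ' '] else [ch]) = fclPiece c := by
  by_cases hv : fclValidChars.contains c = true
  · have hmem : c ∈ fclValidChars := by simpa using hv
    rw [if_pos hv]
    have hall : fclValidChars.all (fun x =>
        (fclEscapeChar x).flatMap (fun ch => if ch == ' ' then ['\\', ' '] else [ch])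
          == fclPiece x) = true := by decide
    exact eq_of_beq (List.all_eq_true.mp hall c hmem)
  · rw [if_neg hv]
    have hvm : c ∉ fclValidChars := by simpa using hv
    have hp : c ∉ fclPlain := fun hm => hvm (by
      have hb : fclPlain.all (fun x => fclValidChars.contains x) = true := by decide
      simpa using List.all_eq_true.mp hb c hm)
    have he : c ∉ fclEsc := fun hm => hvm (by
      have hb : fclEsc.all (fun x => fclValidChars.contains x) = true := by decide
      simpa using List.all_eq_true.mp hb c hm)
    simp [fclPiece, hp, he]

-- the head of dropWhile's remainder fails the predicate
theorem fcl_dropWhile_head_false {α : Type} (p : α → Bool) :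
    ∀ (l : List α) (d : α) (t' : List α), l.dropWhile p = d :: t' → p d = false := by
  intro l
  induction l with
  | nil => intro d t' h; cases h
  | cons a s ih =>
      intro d t' h
      by_cases ha : p a
      · rw [List.dropWhile_cons_of_pos ha] at h; exact ih _ _ h
      · rw [List.dropWhile_cons_of_neg ha] at h
        injection h with h1 _
        subst h1
        simpa using ha

-- a run of plain characters passes through fclPiece unchanged
theorem fcl_flatMap_plain (t : List Char) (h : ∀ x ∈ t, fclPlain.contains x = true) :
    t.flatMap fclPiece = t := by
  induction t with
  | nil => rfl
  | cons a s ih =>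
      have ha := h a (List.mem_cons_self)
      simp only [List.flatMap_cons, fclPiece, ha, if_pos]
      rw [ih (fun x hx => h x (List.mem_cons_of_mem _ hx))]
      rfl

-- B's run-slicing scan also acts characterwise as fclPiece
theorem fcl_goB_eq (l : List Char) : fclGoB l = l.flatMap fclPiece := by
  induction l using fclGoB.induct with
  | case1 l h =>
      rw [fclGoB_eq_nil l h]
      conv_rhs => rw [← List.takeWhile_append_dropWhile (p := fun x => fclPlain.contains x) (l := l)]
      rw [h, List.append_nil]
      exact (fcl_flatMap_plain _ (fun x hx => List.mem_takeWhile_imp hx)).symm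
  | case2 l d t' h ih =>
      rw [fclGoB_eq_cons l d t' h]
      conv_rhs => rw [← List.takeWhile_append_dropWhile (p := fun x => fclPlain.contains x) (l := l)]
      rw [h, List.flatMap_append, List.flatMap_cons,
        fcl_flatMap_plain _ (fun x hx => List.mem_takeWhile_imp hx), ih]
      have hd : fclPlain.contains d = false :=
        fcl_dropWhile_head_false _ l d t' h
      have hd' : d ∉ fclPlain := by simpa using hd
      rw [show fclPiece d = if fclEsc.contains d then ['\\', d] else [] from by
        simp [fclPiece, hd'], List.append_assoc]

-- ===== VERDICT (by name: the statement is the Claim_ definition above) =====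
set_option maxHeartbeats 1000000 in
theorem format_for_command_line_spec : Claim_equal_format_for_command_line := by
  intro text _
  simp only [Spec_format_for_command_line, format_for_command_line, format_for_command_line_alt]
  rw [fcl_replace_single, fcl_goB_eq, fcl_filter_flatMap, List.flatMap_assoc]
  congr 1
  congr 1
  funext c
  exact fcl_pieceA_eq c
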